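-- pv_equiv track=rewrite | github.com/Hongze-Wang/TargetOffer | 字节面试题：找出字符串所包含的最大的十六进制整数.py | getMaxHexNumber
-- ===== SOURCE A (Python) =====
-- def getMaxHexNumber(str):
--     res, cur = 0, 0
--     for s in str:
--         if s >= '0' and s <= '9':
--             cur = cur *16 + ord(s)-48
--         elif s >= 'A' and s <= 'F':
--             cur = cur*16 + ord(s)-55
--         else:
--             cur = 0
--         res = max(res, cur)
--     return res
-- ===== SOURCE B (Python) =====
-- def _is_hex(c):
--     return '0' <= c <= '9' or 'A' <= c <= 'F'
--
-- def _hex_val(run):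
--     v = 0
--     for c in run:
--         v = v * 16 + (ord(c) - 48 if c <= '9' else ord(c) - 55)
--     return v
--
-- def getMaxHexNumber(str):
--     best = 0
--     i, n = 0, len(str)
--     while i < n:
--         if _is_hex(str[i]):
--             j = i + 1
--             while j < n and _is_hex(str[j]):
--                 j += 1
--             best = max(best, _hex_val(str[i:j]))
--             i = j
--         else:
--             i += 1
--     return best
-- ===== Notes on version B (the rewrite author's own statement) =====
-- stated objective: alternative
-- what changed: Replaces the per-character (res,cur) accumulator fold with a tokenize-then-reduce scan: extract each maximal run of uppercase-hex characters, parse the whole run, and take the max of the run values.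
import Mathlib
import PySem

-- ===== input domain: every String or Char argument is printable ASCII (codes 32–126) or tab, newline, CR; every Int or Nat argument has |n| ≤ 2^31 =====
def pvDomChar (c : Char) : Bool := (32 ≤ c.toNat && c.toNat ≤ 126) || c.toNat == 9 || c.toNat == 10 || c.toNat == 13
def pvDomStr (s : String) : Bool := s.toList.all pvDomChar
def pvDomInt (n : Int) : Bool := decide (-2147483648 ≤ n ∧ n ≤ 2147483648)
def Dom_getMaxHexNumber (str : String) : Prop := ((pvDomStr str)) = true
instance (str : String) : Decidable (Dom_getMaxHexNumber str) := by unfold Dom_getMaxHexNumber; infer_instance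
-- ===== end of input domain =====

-- B replaces A's per-character (res,cur) accumulator fold with a tokenize-then-reduce
-- scan over maximal uppercase-hex runs (objective: alternative decomposition, same cost).

-- ===== PORT A =====
def pvStepA (p : Int × Int) (s : Char) : Int × Int :=
  let cur : Int :=
    if '0' ≤ s ∧ s ≤ '9' then p.2 * 16 + ((s.toNat : Int) - 48)
    else if 'A' ≤ s ∧ s ≤ 'F' then p.2 * 16 + ((s.toNat : Int) - 55)
    else 0
  (max p.1 cur, cur)

def getMaxHexNumber (str : String) : Int :=
  (str.toList.foldl pvStepA (0, 0)).1

-- ===== PORT B =====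
def pvIsHex (c : Char) : Bool :=
  (decide ('0' ≤ c) && decide (c ≤ '9')) || (decide ('A' ≤ c) && decide (c ≤ 'F'))

def pvDigit (c : Char) : Int :=
  if c ≤ '9' then (c.toNat : Int) - 48 else (c.toNat : Int) - 55

def pvHexVal (run : List Char) : Int :=
  run.foldl (fun v c => v * 16 + pvDigit c) 0

def pvAltGo (best : Int) : List Char → Int
  | [] => best
  | c :: cs =>
    if pvIsHex c then
      pvAltGo (max best (pvHexVal (c :: cs.takeWhile pvIsHex))) (cs.dropWhile pvIsHex)
    else pvAltGo best cs
termination_by l => l.length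
decreasing_by
  · exact Nat.lt_succ_of_le (List.length_dropWhile_le _ _)
  · simp

def getMaxHexNumber_alt (str : String) : Int := pvAltGo 0 str.toList

-- ===== PRECONDITION & SPEC =====
def Spec_getMaxHexNumber (str : String) (out : Int) : Prop := out = getMaxHexNumber_alt str
instance (str : String) (out : Int) : Decidable (Spec_getMaxHexNumber str out) := by unfold Spec_getMaxHexNumber; infer_instance

-- ===== CLAIM (what is proved, stated in full; the proofs are below) =====
def Claim_equal_getMaxHexNumber : Prop := ∀ (str : String), Dom_getMaxHexNumber str → Spec_getMaxHexNumber str (getMaxHexNumber str)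

-- ===== LEMMAS AND PROOFS =====

theorem pv_char_le_iff (a b : Char) : (a ≤ b) ↔ a.toNat ≤ b.toNat := Iff.rfl

theorem pv_toNat_9 : Char.toNat '9' = 57 := by decide
theorem pv_toNat_0 : Char.toNat '0' = 48 := by decide
theorem pv_toNat_A : Char.toNat 'A' = 65 := by decide

theorem pv_digit_nonneg (c : Char) (h : pvIsHex c = true) : 0 ≤ pvDigit c := by
  simp only [pvIsHex, Bool.or_eq_true, Bool.and_eq_true, decide_eq_true_eq] at h
  unfold pvDigit
  split_ifs with h9
  · rcases h with ⟨h1, _⟩ | ⟨h1, _⟩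
    · have := (pv_char_le_iff '0' c).mp h1
      rw [pv_toNat_0] at this; omega
    · have := (pv_char_le_iff 'A' c).mp h1
      rw [pv_toNat_A] at this; omega
  · rcases h with ⟨_, h2⟩ | ⟨h1, _⟩
    · exact absurd h2 h9
    · have := (pv_char_le_iff 'A' c).mp h1
      rw [pv_toNat_A] at this; omega

theorem pv_stepA_hex (res cur : Int) (c : Char) (h : pvIsHex c = true) :
    pvStepA (res, cur) c = (max res (cur * 16 + pvDigit c), cur * 16 + pvDigit c) := by
  simp only [pvIsHex, Bool.or_eq_true, Bool.and_eq_true, decide_eq_true_eq] at h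
  rcases h with ⟨h1, h2⟩ | ⟨h1, h2⟩
  · simp [pvStepA, pvDigit, h1, h2]
  · have h9 : ¬ (c ≤ '9') := by
      have := (pv_char_le_iff 'A' c).mp h1
      rw [pv_toNat_A] at this
      rw [pv_char_le_iff, pv_toNat_9]
      omega
    simp [pvStepA, pvDigit, h1, h2, h9]

theorem pv_stepA_nonhex (res cur : Int) (c : Char) (h : pvIsHex c = false) (hres : 0 ≤ res) :
    pvStepA (res, cur) c = (res, 0) := by
  simp only [pvIsHex, Bool.or_eq_false_iff, Bool.and_eq_false_iff,
    decide_eq_false_iff_not] at h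
  have hn1 : ¬ ('0' ≤ c ∧ c ≤ '9') := by
    rcases h.1 with h' | h' <;> intro hx <;> [exact h' hx.1; exact h' hx.2]
  have hn2 : ¬ ('A' ≤ c ∧ c ≤ 'F') := by
    rcases h.2 with h' | h' <;> intro hx <;> [exact h' hx.1; exact h' hx.2]
  simp [pvStepA, hn1, hn2, max_eq_left hres]

-- value of a hex run folded from an arbitrary start
def pvHexFrom (cur : Int) (r : List Char) : Int :=
  r.foldl (fun v c => v * 16 + pvDigit c) cur

theorem pv_hexFrom_cons (cur : Int) (c : Char) (cs : List Char) :
    pvHexFrom cur (c :: cs) = pvHexFrom (cur * 16 + pvDigit c) cs := rfl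

theorem pv_hexFrom_ge (cur : Int) (r : List Char) (hr : ∀ c ∈ r, pvIsHex c = true)
    (h : 0 ≤ cur) : cur ≤ pvHexFrom cur r := by
  induction r generalizing cur with
  | nil => simp [pvHexFrom]
  | cons c cs ih =>
    have hd := pv_digit_nonneg c (hr c (by simp))
    have h1 : cur ≤ cur * 16 + pvDigit c := by nlinarith
    have h2 := ih (cur * 16 + pvDigit c) (fun x hx => hr x (by simp [hx])) (le_trans h h1)
    rw [pv_hexFrom_cons]
    exact le_trans h1 h2

theorem pv_foldl_run (r : List Char) : ∀ (res cur : Int),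
    (∀ c ∈ r, pvIsHex c = true) → 0 ≤ cur → cur ≤ res →
    List.foldl pvStepA (res, cur) r = (max res (pvHexFrom cur r), pvHexFrom cur r) := by
  induction r with
  | nil =>
    intro res cur _ _ hcr
    simp [pvHexFrom, max_eq_left hcr]
  | cons c cs ih =>
    intro res cur hr hc hcr
    have hhex := hr c (by simp)
    have hd := pv_digit_nonneg c hhex
    have hc' : (0:Int) ≤ cur * 16 + pvDigit c := by nlinarith
    have hge := pv_hexFrom_ge (cur * 16 + pvDigit c) cs (fun x hx => hr x (by simp [hx])) hc'
    rw [List.foldl_cons, pv_stepA_hex res cur c hhex,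
      ih (max res (cur * 16 + pvDigit c)) (cur * 16 + pvDigit c)
        (fun x hx => hr x (by simp [hx])) hc' (le_max_right _ _),
      pv_hexFrom_cons, max_assoc, max_eq_right hge]

theorem pv_main (n : ℕ) : ∀ (l : List Char), l.length ≤ n → ∀ res : Int, 0 ≤ res →
    (List.foldl pvStepA (res, 0) l).1 = pvAltGo res l := by
  induction n with
  | zero =>
    intro l hl res hres
    have h0 : l = [] := List.length_eq_zero_iff.mp (Nat.le_zero.mp hl)
    subst h0; simp [pvAltGo]
  | succ n ih =>
    intro l hl res hres
    match l with
    | [] => simp [pvAltGo]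
    | c :: cs =>
      by_cases hc : pvIsHex c = true
      · have hsplit : c :: cs = (c :: cs.takeWhile pvIsHex) ++ cs.dropWhile pvIsHex := by
          rw [List.cons_append, List.takeWhile_append_dropWhile]
        have hrun : ∀ x ∈ c :: cs.takeWhile pvIsHex, pvIsHex x = true := by
          intro x hx
          rcases List.mem_cons.mp hx with h | h
          · subst h; exact hc
          · exact List.mem_takeWhile_imp h
        have hvpos : (0:Int) ≤ pvHexFrom 0 (c :: cs.takeWhile pvIsHex) :=
          pv_hexFrom_ge 0 _ hrun le_rfl
        have hres' : (0:Int) ≤ max res (pvHexFrom 0 (c :: cs.takeWhile pvIsHex)) :=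
          le_trans hres (le_max_left _ _)
        have step1 : List.foldl pvStepA (res, 0) (c :: cs)
            = List.foldl pvStepA
                (max res (pvHexFrom 0 (c :: cs.takeWhile pvIsHex)),
                 pvHexFrom 0 (c :: cs.takeWhile pvIsHex)) (cs.dropWhile pvIsHex) := by
          conv_lhs => rw [hsplit]
          rw [List.foldl_append, pv_foldl_run _ res 0 hrun le_rfl hres]
        have step2 : ∀ v : Int, (List.foldl pvStepA
              (max res (pvHexFrom 0 (c :: cs.takeWhile pvIsHex)), v) (cs.dropWhile pvIsHex)).1
            = (List.foldl pvStepA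
              (max res (pvHexFrom 0 (c :: cs.takeWhile pvIsHex)), 0) (cs.dropWhile pvIsHex)).1 := by
          intro v
          match hdrop : cs.dropWhile pvIsHex with
          | [] => rfl
          | d :: ds =>
            have hdh : pvIsHex d = false := by
              have := List.head?_dropWhile_not pvIsHex cs
              rw [hdrop] at this
              simpa using this
            rw [List.foldl_cons, List.foldl_cons,
              pv_stepA_nonhex _ _ _ hdh hres', pv_stepA_nonhex _ _ _ hdh hres']
        have hlen : (cs.dropWhile pvIsHex).length ≤ n := by
          have := List.length_dropWhile_le pvIsHex cs
          simp only [List.length_cons] at hl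
          omega
        rw [step1, step2, ih _ hlen _ hres']
        rw [pvAltGo]
        simp only [hc, if_true]
        rfl
      · have hcf : pvIsHex c = false := by simpa using hc
        rw [List.foldl_cons, pv_stepA_nonhex _ _ _ hcf hres]
        rw [pvAltGo]
        simp only [hcf, Bool.false_eq_true, if_false]
        exact ih cs (by simp only [List.length_cons] at hl; omega) res hres

-- ===== VERDICT (by name: the statement is the Claim_ definition above) =====
theorem getMaxHexNumber_spec : Claim_equal_getMaxHexNumber := by
  intro str _
  unfold Spec_getMaxHexNumber getMaxHexNumber getMaxHexNumber_alt
  exact pv_main str.toList.length str.toList le_rfl 0 le_rfl
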